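-- pv_equiv track=rewrite | github.com/nyimbi/Flask-AppBuilder | tmp/gen_views.py | create_wizard_steps
-- ===== SOURCE A (Python) =====
-- from typing import Dict, List, Any, Tuple, Optional
--
-- def create_wizard_steps(
--     columns: List[Dict[str, Any]]
-- ) -> List[List[Dict[str, Any]]]:
--     steps = []
--     current_step = []
--     for column in columns:
--         if not column["primary_key"]:
--             current_step.append(column)
--             if len(current_step) == 5:
--                 steps.append(current_step)
--                 current_step = []
--     if current_step:
--         steps.append(current_step)
--     return steps
-- ===== SOURCE B (Python) =====
-- def create_wizard_steps(columns):
--     kept = [c for c in columns if not c["primary_key"]]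
--     return [kept[i:i + 5] for i in range(0, len(kept), 5)]
-- ===== Notes on version B (the rewrite author's own statement) =====
-- stated objective: simpler
-- what changed: Replaces the fused single loop that filters and counts a running 5-element accumulator (with an end-of-loop flush) by two separate passes: build the filtered list once, then chunk it with index slices over range(0, len, 5).
import Mathlib
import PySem

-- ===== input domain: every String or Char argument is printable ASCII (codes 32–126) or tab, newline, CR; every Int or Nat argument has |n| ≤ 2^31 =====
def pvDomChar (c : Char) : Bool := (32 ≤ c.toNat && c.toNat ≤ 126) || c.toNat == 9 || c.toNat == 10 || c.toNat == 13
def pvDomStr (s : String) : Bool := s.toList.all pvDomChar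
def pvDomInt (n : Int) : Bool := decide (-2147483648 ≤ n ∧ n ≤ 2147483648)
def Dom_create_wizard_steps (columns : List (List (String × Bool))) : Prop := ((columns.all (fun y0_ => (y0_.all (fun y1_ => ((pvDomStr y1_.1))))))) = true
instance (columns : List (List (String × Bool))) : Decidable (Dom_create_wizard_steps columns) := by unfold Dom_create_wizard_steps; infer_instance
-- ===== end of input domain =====

-- B builds the filtered list once and chunks it by index slices, instead of A's fused
-- filter-and-count-to-5 loop with an end-of-loop flush; objective: simpler.

-- ===== PORT A =====
-- literal transliteration of A: one fold carrying (steps, current_step), then the flush.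
def create_wizard_steps (columns : List (List (String × Bool))) : List (List (List (String × Bool))) :=
  let r := columns.foldl
    (fun (st : List (List (List (String × Bool))) × List (List (String × Bool))) column =>
      if !((PySem.Dict.mk column).getD "primary_key" false) then
        let cur := st.2 ++ [column]
        if cur.length == 5 then (st.1 ++ [cur], []) else (st.1, cur)
      else st)
    ([], [])
  if !r.2.isEmpty then r.1 ++ [r.2] else r.1

-- ===== PORT B =====
-- literal transliteration of B: filter once, then slice windows over range(0, len, 5).
def create_wizard_steps_alt (columns : List (List (String × Bool))) : List (List (List (String × Bool))) :=
  let kept := columns.filter (fun c => !((PySem.Dict.mk c).getD "primary_key" false))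
  (PySem.List.pyRange 0 (kept.length : Int) 5).map
    (fun i => PySem.List.slice kept (some i) (some (i + 5)))

-- ===== PRECONDITION & SPEC =====
-- Pre_ excludes exactly the inputs where some column lacks the "primary_key" key,
-- on which Python A raises KeyError.
def Pre_create_wizard_steps (columns : List (List (String × Bool))) : Prop :=
  (columns.all (fun c => c.any (fun kv => kv.1 == "primary_key"))) = true
instance (columns : List (List (String × Bool))) : Decidable (Pre_create_wizard_steps columns) := by unfold Pre_create_wizard_steps; infer_instance

def pvWitness_create_wizard_steps : (List (List (String × Bool))) :=
  [[("primary_key", false)], [("primary_key", true)], [("primary_key", false), ("name", true)]]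

def Spec_create_wizard_steps (columns : List (List (String × Bool))) (out : List (List (List (String × Bool)))) : Prop := out = create_wizard_steps_alt columns
instance (columns : List (List (String × Bool))) (out : List (List (List (String × Bool)))) : Decidable (Spec_create_wizard_steps columns out) := by unfold Spec_create_wizard_steps; infer_instance

-- ===== CLAIM (what is proved, stated in full; the proofs are below) =====
def Claim_equal_create_wizard_steps : Prop := ∀ (columns : List (List (String × Bool))), Dom_create_wizard_steps columns → Pre_create_wizard_steps columns → Spec_create_wizard_steps columns (create_wizard_steps columns)

-- ===== LEMMAS AND PROOFS =====

-- chunks of 5, the common characterisation of both programs' output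
def chunks5 {α : Type} : List α → List (List α)
  | [] => []
  | x :: xs => ((x :: xs).take 5) :: chunks5 ((x :: xs).drop 5)
  termination_by l => l.length
  decreasing_by simp only [List.length_drop, List.length_cons]; omega

-- A's loop body after the filter has been factored out
def pvStep (st : List (List (List (String × Bool))) × List (List (String × Bool)))
    (column : List (String × Bool)) :
    List (List (List (String × Bool))) × List (List (String × Bool)) :=
  let cur := st.2 ++ [column]
  if cur.length == 5 then (st.1 ++ [cur], []) else (st.1, cur)

lemma chunks5_of_small {α : Type} (cur : List α) (h5 : cur.length < 5) (hne : cur ≠ []) :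
    chunks5 cur = [cur] := by
  cases cur with
  | nil => exact absurd rfl hne
  | cons x xs =>
    rw [chunks5, List.take_of_length_le (Nat.le_of_lt h5),
        List.drop_eq_nil_of_le (Nat.le_of_lt h5), chunks5]

lemma chunks5_full {α : Type} (c l : List α) (h : c.length = 5) :
    chunks5 (c ++ l) = c :: chunks5 l := by
  match c, h with
  | x :: xs, h =>
    have h1 : List.take 5 (x :: (xs ++ l)) = x :: xs := by
      rw [← h, show x :: (xs ++ l) = (x :: xs) ++ l from rfl, List.take_left]
    have h2 : List.drop 5 (x :: (xs ++ l)) = l := by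
      rw [← h, show x :: (xs ++ l) = (x :: xs) ++ l from rfl, List.drop_left]
    show chunks5 (x :: (xs ++ l)) = (x :: xs) :: chunks5 l
    rw [chunks5, h1, h2]

-- loop invariant for A's fold
lemma fold_inv (l : List (List (String × Bool)))
    (steps : List (List (List (String × Bool)))) (cur : List (List (String × Bool)))
    (h5 : cur.length < 5) :
    (let r := l.foldl pvStep (steps, cur)
     if !r.2.isEmpty then r.1 ++ [r.2] else r.1) = steps ++ chunks5 (cur ++ l) := by
  induction l generalizing steps cur with
  | nil =>
    simp only [List.foldl_nil, List.append_nil]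
    cases cur with
    | nil => simp [chunks5]
    | cons x xs => simp [chunks5_of_small _ h5 (by simp)]
  | cons x l ih =>
    simp only [List.foldl_cons]
    by_cases hfull : (cur ++ [x]).length = 5
    · have hst : pvStep (steps, cur) x = (steps ++ [cur ++ [x]], []) := by
        simp [pvStep, hfull]
      rw [hst, ih _ _ (by simp)]
      have he : cur ++ x :: l = (cur ++ [x]) ++ l := by simp
      rw [he, chunks5_full _ _ hfull]
      simp
    · have hst : pvStep (steps, cur) x = (steps, cur ++ [x]) := by
        simp only [pvStep]
        rw [if_neg (by simpa using hfull)]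
      rw [hst, ih _ _ (by simp at hfull ⊢; omega)]
      simp

-- range(0, n, 5) indices of B, reduced to take/drop chunks
lemma range_slices_eq_chunks5 {α : Type} (m : Nat) (l : List α) (hm : l.length = m) :
    (List.range ((l.length + 4) / 5)).map
      (fun (k : Nat) => PySem.List.slice l (some ((0 : Int) + 5 * (k : Int)))
        (some ((0 : Int) + 5 * (k : Int) + 5))) = chunks5 l := by
  induction m using Nat.strong_induction_on generalizing l with
  | _ m ih =>
    cases l with
    | nil => simp [chunks5]
    | cons x xs =>
      have hsplit : ((x :: xs).length + 4) / 5 = (((x :: xs).drop 5).length + 4) / 5 + 1 := by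
        simp only [List.length_drop, List.length_cons]
        omega
      have h0 : PySem.List.slice (x :: xs) (some ((0 : Int) + 5 * ((0 : Nat) : Int)))
          (some ((0 : Int) + 5 * ((0 : Nat) : Int) + 5)) = (x :: xs).take 5 := by
        have := PySem.List.slice_natCast_add (x :: xs) 0 5
        simpa using this
      have hshift : ∀ k : Nat,
          PySem.List.slice (x :: xs) (some ((0 : Int) + 5 * ((k + 1 : Nat) : Int)))
            (some ((0 : Int) + 5 * ((k + 1 : Nat) : Int) + 5))
          = PySem.List.slice ((x :: xs).drop 5) (some ((0 : Int) + 5 * (k : Int)))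
            (some ((0 : Int) + 5 * (k : Int) + 5)) := by
        intro k
        have h1 := PySem.List.slice_natCast_add (x :: xs) (5 * (k + 1)) 5
        have h2 := PySem.List.slice_natCast_add ((x :: xs).drop 5) (5 * k) 5
        have e1 : ((0 : Int) + 5 * ((k + 1 : Nat) : Int)) = ((5 * (k + 1) : Nat) : Int) := by
          push_cast; ring
        have e2 : ((0 : Int) + 5 * ((k + 1 : Nat) : Int) + 5)
            = ((5 * (k + 1) : Nat) : Int) + ((5 : Nat) : Int) := by push_cast; ring
        have e3 : ((0 : Int) + 5 * ((k : Nat) : Int)) = ((5 * k : Nat) : Int) := by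
          push_cast; ring
        have e4 : ((0 : Int) + 5 * ((k : Nat) : Int) + 5)
            = ((5 * k : Nat) : Int) + ((5 : Nat) : Int) := by push_cast; ring
        rw [e2, e1, h1, e4, e3, h2, List.drop_drop,
            show 5 * (k + 1) = 5 + 5 * k from by omega]
      rw [hsplit, List.range_succ_eq_map, List.map_cons, List.map_map, chunks5, ← h0]
      congr 1
      have ihd := ih ((x :: xs).drop 5).length
        (by simp only [List.length_drop, List.length_cons] at hm ⊢; omega) ((x :: xs).drop 5) rfl
      rw [← ihd]
      apply List.map_congr_left
      intro k _
      exact hshift k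

-- B's slicing over range(0, len, 5) produces exactly the 5-chunks
lemma slices_eq_chunks5 {α : Type} (l : List α) :
    (PySem.List.pyRange 0 (l.length : Int) 5).map
      (fun i => PySem.List.slice l (some i) (some (i + 5))) = chunks5 l := by
  rw [PySem.List.pyRange_of_pos _ _ (by norm_num)]
  have hcnt : (if (0 : Int) < (l.length : Int) then (((l.length : Int) - 0 + 5 - 1) / 5).toNat else 0)
      = (l.length + 4) / 5 := by
    have he : ((l.length : Int) - 0 + 5 - 1) = ((l.length + 4 : Nat) : Int) := by push_cast; ring
    split_ifs with h
    · rw [he, show (5 : Int) = ((5 : Nat) : Int) from rfl, ← Int.natCast_div, Int.toNat_natCast]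
    · have : l.length = 0 := by omega
      omega
  rw [hcnt, List.map_map]
  exact range_slices_eq_chunks5 l.length l rfl

-- ===== VERDICT (by name: the statement is the Claim_ definition above) =====
theorem create_wizard_steps_spec : Claim_equal_create_wizard_steps := by
  intro columns _ _
  unfold Spec_create_wizard_steps create_wizard_steps create_wizard_steps_alt
  have hA : (columns.foldl
      (fun (st : List (List (List (String × Bool))) × List (List (String × Bool))) column =>
        if !((PySem.Dict.mk column).getD "primary_key" false) then
          let cur := st.2 ++ [column]
          if cur.length == 5 then (st.1 ++ [cur], []) else (st.1, cur)
        else st)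
      ([], []))
      = (columns.filter (fun c => !((PySem.Dict.mk c).getD "primary_key" false))).foldl pvStep ([], []) := by
    exact PySem.List.foldl_if_eq_foldl_filter
      (fun c => !((PySem.Dict.mk c).getD "primary_key" false)) pvStep columns ([], [])
  simp only [hA]
  rw [slices_eq_chunks5]
  have := fold_inv (columns.filter (fun c => !((PySem.Dict.mk c).getD "primary_key" false))) [] [] (by simp)
  simpa using this
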